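-- pv_equiv track=rewrite | github.com/skarl/event_deduplication | src/event_dedup/canonical/synthesizer.py | _select_longest_non_generic
-- ===== SOURCE A (Python) =====
-- def _select_longest_non_generic(
--     events: list[dict], field: str, min_length: int = 10
-- ) -> tuple[str, str]:
--     """Select the longest value that is at least *min_length* characters.
--
--     If no value meets the minimum length, falls back to the longest
--     value regardless.
--
--     Returns:
--         Tuple of (value, source_event_id).
--     """
--     # Collect values >= min_length
--     long_candidates: list[tuple[str, str]] = []
--     all_candidates: list[tuple[str, str]] = []
--
--     for e in events:
--         val = e.get(field)
--         if val:
--             src = e.get("id", "unknown")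
--             all_candidates.append((val, src))
--             if len(val) >= min_length:
--                 long_candidates.append((val, src))
--
--     # Prefer long candidates; fall back to all
--     pool = long_candidates if long_candidates else all_candidates
--     if not pool:
--         # All None/empty -- return empty string from first event
--         return "", events[0].get("id", "unknown")
--
--     # Pick longest in the pool
--     best = max(pool, key=lambda x: len(x[0]))
--     return best[0], best[1]
-- ===== SOURCE B (Python) =====
-- def _select_longest_non_generic(
--     events: list[dict], field: str, min_length: int = 10
-- ) -> tuple[str, str]:
--     """One pass: track the first-seen longest value overall and the
--     first-seen longest value with len >= min_length; no candidate lists."""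
--     best_long = None  # (length, value, source)
--     best_any = None
--     for e in events:
--         val = e.get(field)
--         if val:
--             src = e.get("id", "unknown")
--             n = len(val)
--             if best_any is None or n > best_any[0]:
--                 best_any = (n, val, src)
--             if n >= min_length and (best_long is None or n > best_long[0]):
--                 best_long = (n, val, src)
--     win = best_long if best_long is not None else best_any
--     if win is not None:
--         return win[1], win[2]
--     return "", events[0].get("id", "unknown")
-- ===== Notes on version B (the rewrite author's own statement) =====
-- stated objective: alternative
-- what changed: Replaces A's two accumulated candidate lists plus a final max() pass by a single pass over events that maintains two running (length, value, source) winners with strict-> updates, so no intermediate lists are built.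
import Mathlib
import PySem

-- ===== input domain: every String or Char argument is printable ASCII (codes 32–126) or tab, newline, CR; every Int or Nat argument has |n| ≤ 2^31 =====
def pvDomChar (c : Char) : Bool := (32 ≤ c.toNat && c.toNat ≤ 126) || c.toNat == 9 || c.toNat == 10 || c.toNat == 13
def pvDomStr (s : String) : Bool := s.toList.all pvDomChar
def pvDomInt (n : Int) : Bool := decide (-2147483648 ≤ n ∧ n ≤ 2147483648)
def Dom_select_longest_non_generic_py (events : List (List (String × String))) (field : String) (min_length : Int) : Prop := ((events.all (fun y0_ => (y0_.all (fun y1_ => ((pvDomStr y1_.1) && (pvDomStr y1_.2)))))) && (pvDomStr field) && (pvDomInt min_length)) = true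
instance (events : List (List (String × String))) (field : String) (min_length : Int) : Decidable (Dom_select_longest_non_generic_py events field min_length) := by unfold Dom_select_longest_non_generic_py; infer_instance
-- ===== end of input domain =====

-- B replaces A's two candidate lists + final max pass by one pass with two running winners (alternative decomposition, same result).

-- ===== PORT A =====
-- loop body of A's for-loop: collect (val, src) into all_candidates, and into long_candidates when len(val) >= min_length
def pvStepA (field : String) (min_length : Int)
    (acc : List (String × String) × List (String × String)) (e : List (String × String)) :
    List (String × String) × List (String × String) :=
  match PySem.Dict.get? ⟨e⟩ field with
  | some val =>
    if val ≠ "" then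
      let src := PySem.Dict.getD ⟨e⟩ "id" "unknown"
      (if PySem.Str.len val ≥ min_length then acc.1 ++ [(val, src)] else acc.1,
       acc.2 ++ [(val, src)])
    else acc
  | none => acc

def select_longest_non_generic_py (events : List (List (String × String))) (field : String) (min_length : Int) : String × String :=
  let acc := events.foldl (pvStepA field min_length) ([], [])
  let pool := if acc.1 ≠ [] then acc.1 else acc.2
  if pool = [] then
    ("", PySem.Dict.getD ⟨events.headD []⟩ "id" "unknown")  -- events[0]: fallback value; Pre_ excludes events = [] (IndexError)
  else
    match PySem.List.max? pool (fun x => PySem.Str.len x.1) with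
    | some best => (best.1, best.2)
    | none => ("", "")

-- ===== PORT B =====
-- loop body of B's one pass: update the running (length, value, source) winners (strict > keeps the first-seen maximum)
def pvStepB (field : String) (min_length : Int)
    (acc : Option (Int × String × String) × Option (Int × String × String)) (e : List (String × String)) :
    Option (Int × String × String) × Option (Int × String × String) :=
  match PySem.Dict.get? ⟨e⟩ field with
  | some val =>
    if val ≠ "" then
      let src := PySem.Dict.getD ⟨e⟩ "id" "unknown"
      let n := PySem.Str.len val
      let bAny := match acc.2 with
        | none => some (n, val, src)
        | some b => if n > b.1 then some (n, val, src) else some b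
      let bLong := if n ≥ min_length then
          match acc.1 with
          | none => some (n, val, src)
          | some b => if n > b.1 then some (n, val, src) else some b
        else acc.1
      (bLong, bAny)
    else acc
  | none => acc

def select_longest_non_generic_py_alt (events : List (List (String × String))) (field : String) (min_length : Int) : String × String :=
  let r := events.foldl (pvStepB field min_length) (none, none)
  match (match r.1 with | some w => some w | none => r.2) with
  | some (_, v, s) => (v, s)
  | none => ("", PySem.Dict.getD ⟨events.headD []⟩ "id" "unknown")

-- ===== PRECONDITION & SPEC =====
-- Pre_ excludes only events = [], on which the Python A (and B) raises IndexError at events[0]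
def Pre_select_longest_non_generic_py (events : List (List (String × String))) (field : String) (min_length : Int) : Prop :=
  events ≠ []
instance (events : List (List (String × String))) (field : String) (min_length : Int) : Decidable (Pre_select_longest_non_generic_py events field min_length) := by unfold Pre_select_longest_non_generic_py; infer_instance

def pvWitness_select_longest_non_generic_py : (List (List (String × String))) × String × Int :=
  ([[("f", "hello world"), ("id", "e1")], [("f", "x")]], "f", 10)

def Spec_select_longest_non_generic_py (events : List (List (String × String))) (field : String) (min_length : Int) (out : String × String) : Prop := out = select_longest_non_generic_py_alt events field min_length
instance (events : List (List (String × String))) (field : String) (min_length : Int) (out : String × String) : Decidable (Spec_select_longest_non_generic_py events field min_length out) := by unfold Spec_select_longest_non_generic_py; infer_instance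

-- ===== CLAIM (what is proved, stated in full; the proofs are below) =====
def Claim_equal_select_longest_non_generic_py : Prop := ∀ (events : List (List (String × String))) (field : String) (min_length : Int), Dom_select_longest_non_generic_py events field min_length → Pre_select_longest_non_generic_py events field min_length → Spec_select_longest_non_generic_py events field min_length (select_longest_non_generic_py events field min_length)

-- ===== LEMMAS AND PROOFS =====

-- the candidate a single event contributes (value with its source id), if any
def pvCand (field : String) (e : List (String × String)) : Option (String × String) :=
  match PySem.Dict.get? ⟨e⟩ field with
  | some val => if val ≠ "" then some (val, PySem.Dict.getD ⟨e⟩ "id" "unknown") else none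
  | none => none

def pvKey (p : String × String) : Int := PySem.Str.len p.1

def pvTag (p : String × String) : Int × String × String := (PySem.Str.len p.1, p.1, p.2)

def pvMStep (o : Option (Int × String × String)) (p : String × String) : Option (Int × String × String) :=
  match o with
  | none => some (pvTag p)
  | some b => if PySem.Str.len p.1 > b.1 then some (pvTag p) else some b

def pvMaxStep (o : Option (String × String)) (p : String × String) : Option (String × String) :=
  match o with
  | none => some p
  | some m => if pvKey m < pvKey p then some p else some m

lemma pv_stepA_eq (field : String) (ml : Int) (acc : List (String × String) × List (String × String)) (e : List (String × String)) :
    pvStepA field ml acc e =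
      match pvCand field e with
      | none => acc
      | some p => ((if ml ≤ PySem.Str.len p.1 then acc.1 ++ [p] else acc.1), acc.2 ++ [p]) := by
  unfold pvStepA pvCand
  cases h : PySem.Dict.get? (⟨e⟩ : PySem.Dict String String) field with
  | none => rfl
  | some val =>
    by_cases hv : val = ""
    · simp [hv]
    · simp only [hv, ne_eq, not_false_iff, if_true, ge_iff_le]

lemma pv_stepB_eq (field : String) (ml : Int) (acc : Option (Int × String × String) × Option (Int × String × String)) (e : List (String × String)) :
    pvStepB field ml acc e =
      match pvCand field e with
      | none => acc
      | some p => ((if ml ≤ PySem.Str.len p.1 then pvMStep acc.1 p else acc.1), pvMStep acc.2 p) := by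
  obtain ⟨l, a⟩ := acc
  unfold pvStepB pvCand pvMStep pvTag
  cases h : PySem.Dict.get? (⟨e⟩ : PySem.Dict String String) field with
  | none => rfl
  | some val =>
    by_cases hv : val = ""
    · simp [hv]
    · simp only [hv, ne_eq, not_false_iff, if_true, ge_iff_le]

lemma pv_foldA_char (field : String) (ml : Int) :
    ∀ (es : List (List (String × String))) (L A : List (String × String)),
      es.foldl (pvStepA field ml) (L, A) =
        (L ++ (es.filterMap (pvCand field)).filter (fun p => decide (ml ≤ PySem.Str.len p.1)),
         A ++ es.filterMap (pvCand field)) := by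
  intro es
  induction es with
  | nil => intro L A; simp
  | cons e es ih =>
    intro L A
    rw [List.foldl_cons, pv_stepA_eq]
    cases hc : pvCand field e with
    | none => simp [hc, ih]
    | some p =>
      by_cases hp : ml ≤ (p.1.length : Int)
      · simp [hc, hp, ih]
      · simp [hc, hp, ih]

lemma pv_foldB_char (field : String) (ml : Int) :
    ∀ (es : List (List (String × String))) (l a : Option (Int × String × String)),
      es.foldl (pvStepB field ml) (l, a) =
        (((es.filterMap (pvCand field)).filter (fun p => decide (ml ≤ PySem.Str.len p.1))).foldl pvMStep l,
         (es.filterMap (pvCand field)).foldl pvMStep a) := by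
  intro es
  induction es with
  | nil => intro l a; simp
  | cons e es ih =>
    intro l a
    rw [List.foldl_cons, pv_stepB_eq]
    cases hc : pvCand field e with
    | none => simp [hc, ih]
    | some p =>
      by_cases hp : ml ≤ (p.1.length : Int)
      · simp [hc, hp, ih]
      · simp [hc, hp, ih]

lemma pv_mstep_tag (o : Option (String × String)) (p : String × String) :
    pvMStep (o.map pvTag) p = (pvMaxStep o p).map pvTag := by
  cases o with
  | none => rfl
  | some m =>
    show pvMStep (some (pvTag m)) p = _
    unfold pvMStep pvMaxStep pvTag pvKey
    by_cases h : PySem.Str.len m.1 < PySem.Str.len p.1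
    · simp only [gt_iff_lt, h, if_true]
      rfl
    · simp only [gt_iff_lt, h, if_false]
      rfl

lemma pv_fold_mstep_eq :
    ∀ (cs : List (String × String)) (o : Option (String × String)),
      cs.foldl pvMStep (o.map pvTag) = (cs.foldl pvMaxStep o).map pvTag := by
  intro cs
  induction cs with
  | nil => intro o; rfl
  | cons c cs ih =>
    intro o
    rw [List.foldl_cons, List.foldl_cons, pv_mstep_tag]
    exact ih _

lemma pv_max?_eq_fold (cs : List (String × String)) :
    PySem.List.max? cs pvKey = cs.foldl pvMaxStep none := by
  unfold PySem.List.max? pvMaxStep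
  congr 1
  funext acc x
  cases acc <;> rfl

lemma pv_fold_mstep_none (cs : List (String × String)) :
    cs.foldl pvMStep none = (PySem.List.max? cs pvKey).map pvTag := by
  have h := pv_fold_mstep_eq cs none
  rw [pv_max?_eq_fold]
  simpa using h

-- ===== VERDICT (by name: the statement is the Claim_ definition above) =====
theorem select_longest_non_generic_py_spec : Claim_equal_select_longest_non_generic_py := by
  unfold Claim_equal_select_longest_non_generic_py
  intro events field min_length _hdom _hpre
  unfold Spec_select_longest_non_generic_py
  unfold select_longest_non_generic_py select_longest_non_generic_py_alt
  rw [pv_foldA_char field min_length events [] [], pv_foldB_char field min_length events none none]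
  rw [show (fun x : String × String => PySem.Str.len x.1) = pvKey from rfl]
  simp only [List.nil_append, pv_fold_mstep_none]
  set alls := events.filterMap (pvCand field) with halls
  set longs := alls.filter (fun p => decide (min_length ≤ PySem.Str.len p.1)) with hlongs
  have hnil : PySem.List.max? ([] : List (String × String)) pvKey = none := rfl
  by_cases hL : longs = []
  · by_cases hA : alls = []
    · simp [hL, hA, hnil]
    · have hm : PySem.List.max? alls pvKey ≠ none := by
        intro h; exact hA ((PySem.List.max?_eq_none_iff _ _).mp h)
      obtain ⟨ba, hba⟩ := Option.ne_none_iff_exists'.mp hm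
      simp [hL, hA, hnil, hba, pvTag]
  · have hm : PySem.List.max? longs pvKey ≠ none := by
      intro h; exact hL ((PySem.List.max?_eq_none_iff _ _).mp h)
    obtain ⟨bl, hbl⟩ := Option.ne_none_iff_exists'.mp hm
    simp [hL, hbl, pvTag]
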